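-- pv_equiv track=rewrite | github.com/TicaCode/AdventOfCode2022 | Day2.py | calculate_win
-- ===== SOURCE A (Python) =====
-- from typing import List
--
-- def calculate_win(battles: List, scores: dict):
--     total_score = 0
--     for battle in battles:
--         opponent = battle[0]
--         me = battle[1]
--         if (opponent == 'A' and me == 'X') or (opponent == 'B' and me == 'Y') or (opponent == 'C' and me == 'Z'):
--             total_score += scores[me] + 3
--         elif (opponent == 'A' and me == 'Y') or (opponent == 'B' and me == 'Z') or (opponent == 'C' and me == 'X'):
--             total_score += scores[me] + 6
--         else:
--             total_score += scores[me]
--     return total_score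
-- ===== SOURCE B (Python) =====
-- # Alternative algorithm: aggregate duplicate battles into a frequency table first,
-- # then score each DISTINCT (opponent, me) pair once, weighted by its count.
-- def calculate_win(battles, scores):
--     counts = {}
--     for battle in battles:
--         pair = (battle[0], battle[1])
--         counts[pair] = counts.get(pair, 0) + 1
--     total = 0
--     for (opponent, me), n in counts.items():
--         if (opponent, me) in (('A', 'X'), ('B', 'Y'), ('C', 'Z')):
--             bonus = 3
--         elif (opponent, me) in (('A', 'Y'), ('B', 'Z'), ('C', 'X')):
--             bonus = 6
--         else:
--             bonus = 0
--         total += n * (scores[me] + bonus)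
--     return total
-- ===== Notes on version B (the rewrite author's own statement) =====
-- stated objective: alternative
-- what changed: Instead of scoring battle by battle in one pass, B first aggregates the battles into a frequency dict keyed by (opponent, me) and then scores each distinct pair once, multiplying its per-pair score by its multiplicity; correct because the total is a sum of a per-pair value over the multiset of battles.
import Mathlib
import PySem

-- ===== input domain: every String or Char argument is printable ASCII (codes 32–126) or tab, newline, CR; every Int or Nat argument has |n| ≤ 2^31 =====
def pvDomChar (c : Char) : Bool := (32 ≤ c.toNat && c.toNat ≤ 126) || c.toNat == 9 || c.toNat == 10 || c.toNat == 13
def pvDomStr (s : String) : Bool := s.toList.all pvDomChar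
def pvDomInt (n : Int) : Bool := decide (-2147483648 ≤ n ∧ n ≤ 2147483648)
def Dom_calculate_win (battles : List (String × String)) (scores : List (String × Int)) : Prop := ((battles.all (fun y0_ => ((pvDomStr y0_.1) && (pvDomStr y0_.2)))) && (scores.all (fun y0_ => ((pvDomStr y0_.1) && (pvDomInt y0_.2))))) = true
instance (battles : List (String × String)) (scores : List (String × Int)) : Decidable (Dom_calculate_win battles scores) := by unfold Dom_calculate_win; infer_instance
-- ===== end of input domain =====

-- B aggregates the battles into a frequency dict keyed by (opponent, me) and then scores
-- each distinct pair once, weighted by its count (alternative algorithm; same result).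

-- ===== PORT A =====
-- scores[me] (dict lookup; KeyError excluded by Pre_) → getD on the assoc dict, first match
def calculate_win (battles : List (String × String)) (scores : List (String × Int)) : Int :=
  battles.foldl (fun total_score battle =>
    let opponent := battle.1
    let me := battle.2
    if (opponent = "A" ∧ me = "X") ∨ (opponent = "B" ∧ me = "Y") ∨ (opponent = "C" ∧ me = "Z") then
      total_score + (PySem.Dict.getD (PySem.Dict.mk scores) me 0 + 3)
    else if (opponent = "A" ∧ me = "Y") ∨ (opponent = "B" ∧ me = "Z") ∨ (opponent = "C" ∧ me = "X") then
      total_score + (PySem.Dict.getD (PySem.Dict.mk scores) me 0 + 6)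
    else
      total_score + PySem.Dict.getD (PySem.Dict.mk scores) me 0) 0

-- ===== PORT B =====
-- Source B: first loop builds counts (dict: pair ↦ multiplicity, via .get(pair,0)+1);
-- second loop walks counts.items(), picks the bonus, and adds n * (scores[me] + bonus).
def calculate_win_alt (battles : List (String × String)) (scores : List (String × Int)) : Int :=
  let counts : PySem.Dict (String × String) Int :=
    battles.foldl (fun d battle =>
      let pair := (battle.1, battle.2)
      PySem.Dict.insert d pair (PySem.Dict.getD d pair 0 + 1)) PySem.Dict.empty
  (PySem.Dict.items counts).foldl (fun total pk =>
    let opponent := pk.1.1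
    let me := pk.1.2
    let n := pk.2
    let bonus : Int :=
      if (opponent, me) = ("A", "X") ∨ (opponent, me) = ("B", "Y") ∨ (opponent, me) = ("C", "Z") then 3
      else if (opponent, me) = ("A", "Y") ∨ (opponent, me) = ("B", "Z") ∨ (opponent, me) = ("C", "X") then 6
      else 0
    total + n * (PySem.Dict.getD (PySem.Dict.mk scores) me 0 + bonus)) 0

-- ===== PRECONDITION & SPEC =====
-- Pre_ excludes exactly the inputs where some battle's second letter is not a key of
-- scores: there Python A (and B) raise KeyError.
def Pre_calculate_win (battles : List (String × String)) (scores : List (String × Int)) : Prop :=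
  ∀ b ∈ battles, b.2 ∈ scores.map Prod.fst
instance (battles : List (String × String)) (scores : List (String × Int)) : Decidable (Pre_calculate_win battles scores) := by unfold Pre_calculate_win; infer_instance

def pvWitness_calculate_win : (List (String × String)) × (List (String × Int)) :=
  ([("A", "Y"), ("C", "Z"), ("A", "Y"), ("B", "X")], [("X", 1), ("Y", 2), ("Z", 3)])

def Spec_calculate_win (battles : List (String × String)) (scores : List (String × Int)) (out : Int) : Prop := out = calculate_win_alt battles scores
instance (battles : List (String × String)) (scores : List (String × Int)) (out : Int) : Decidable (Spec_calculate_win battles scores out) := by unfold Spec_calculate_win; infer_instance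

-- ===== CLAIM (what is proved, stated in full; the proofs are below) =====
def Claim_equal_calculate_win : Prop := ∀ (battles : List (String × String)) (scores : List (String × Int)), Dom_calculate_win battles scores → Pre_calculate_win battles scores → Spec_calculate_win battles scores (calculate_win battles scores)

-- ===== LEMMAS AND PROOFS =====

-- The per-pair value both programs assign to one battle (opponent, me).
def pvVal (scores : List (String × Int)) (p : String × String) : Int :=
  PySem.Dict.getD (PySem.Dict.mk scores) p.2 0 +
    (if (p.1 = "A" ∧ p.2 = "X") ∨ (p.1 = "B" ∧ p.2 = "Y") ∨ (p.1 = "C" ∧ p.2 = "Z") then 3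
     else if (p.1 = "A" ∧ p.2 = "Y") ∨ (p.1 = "B" ∧ p.2 = "Z") ∨ (p.1 = "C" ∧ p.2 = "X") then 6
     else 0)

-- A is the plain sum of pvVal over the battles.
theorem pvA_eq (battles : List (String × String)) (scores : List (String × Int)) :
    calculate_win battles scores = (battles.map (pvVal scores)).sum := by
  unfold calculate_win
  induction battles using List.reverseRecOn with
  | nil => simp
  | append_singleton bs b ih =>
    simp only [List.foldl_append, List.foldl_cons, List.foldl_nil, ih,
      List.map_append, List.sum_append, List.map_cons, List.map_nil, List.sum_cons,
      List.sum_nil, pvVal]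
    split_ifs <;> ring

-- B is the count-weighted sum of pvVal over the distinct pairs.
theorem pvB_eq (battles : List (String × String)) (scores : List (String × Int)) :
    calculate_win_alt battles scores
      = ((PySem.Set.ofList battles).map
          (fun p => (battles.count p : Int) * pvVal scores p)).sum := by
  unfold calculate_win_alt
  have hc : battles.foldl (fun d battle =>
      let pair := (battle.1, battle.2)
      PySem.Dict.insert d pair (PySem.Dict.getD d pair 0 + 1)) PySem.Dict.empty
      = PySem.Dict.counter battles := by
    rw [← PySem.Dict.foldl_insert_getD_add_one_eq_counter]
  rw [hc]
  simp only [PySem.Dict.items_counter, PySem.List.foldl_add, List.map_map, zero_add]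
  refine congrArg List.sum (List.map_congr_left ?_)
  intro p hp
  simp only [Function.comp, pvVal, Prod.mk.injEq]

-- The weighted sum over distinct pairs equals the plain sum (counting identity).
theorem pv_count_sum (l : List (String × String)) (f : String × String → Int) :
    ((PySem.Set.ofList l).map (fun p => (l.count p : Int) * f p)).sum
      = (l.map f).sum := by
  have hnd : (PySem.Set.ofList l).Nodup := PySem.Set.nodup_ofList l
  have htf : (PySem.Set.ofList l).toFinset = l.toFinset := by
    ext x; simp [List.mem_toFinset, PySem.Set.mem_ofList]
  rw [← List.sum_toFinset _ hnd, htf, Finset.sum_list_map_count]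
  refine Finset.sum_congr rfl fun x hx => ?_
  rw [nsmul_eq_mul]
  congr 1
  norm_cast
  clear hnd htf hx
  induction l with
  | nil => rfl
  | cons a t ih => simp [List.count_cons, ih]

theorem pv_main (battles : List (String × String)) (scores : List (String × Int)) :
    calculate_win battles scores = calculate_win_alt battles scores := by
  rw [pvA_eq, pvB_eq, pv_count_sum]

-- ===== VERDICT (by name: the statement is the Claim_ definition above) =====
theorem calculate_win_spec : Claim_equal_calculate_win := by
  intro battles scores _ _
  unfold Spec_calculate_win
  exact pv_main battles scores
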